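-- pv_equiv track=rewrite | github.com/KIST-delight-robotics/DrumRobot2 | phil_robot/pipeline/motion_resolver.py | _replace_or_append_look_op_cmd
-- ===== SOURCE A (Python) =====
-- def _replace_or_append_look_op_cmd(op_cmds, look_op_cmd):
--     updated_commands = []
--     replaced = False
--
--     for command in op_cmds:
--         if command.startswith("look:") and not replaced:
--             updated_commands.append(look_op_cmd)
--             replaced = True
--         elif not command.startswith("look:"):
--             updated_commands.append(command)
--
--     if not replaced:
--         updated_commands.append(look_op_cmd)
--
--     return updated_commands
-- ===== SOURCE B (Python) =====
-- def _replace_or_append_look_op_cmd(op_cmds, look_op_cmd):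
--     i = next((i for i, c in enumerate(op_cmds) if c.startswith("look:")), None)
--     if i is None:
--         return list(op_cmds) + [look_op_cmd]
--     return list(op_cmds[:i]) + [look_op_cmd] + [c for c in op_cmds[i + 1:] if not c.startswith("look:")]
-- ===== Notes on version B (the rewrite author's own statement) =====
-- stated objective: alternative
-- what changed: Replaces A's single pass with a boolean 'replaced' flag by first locating the index of the first 'look:' command, then assembling the result as head-slice ++ [look_op_cmd] ++ filtered tail (or whole list + append when absent), so the head slice is copied without per-element state.
import Mathlib
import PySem

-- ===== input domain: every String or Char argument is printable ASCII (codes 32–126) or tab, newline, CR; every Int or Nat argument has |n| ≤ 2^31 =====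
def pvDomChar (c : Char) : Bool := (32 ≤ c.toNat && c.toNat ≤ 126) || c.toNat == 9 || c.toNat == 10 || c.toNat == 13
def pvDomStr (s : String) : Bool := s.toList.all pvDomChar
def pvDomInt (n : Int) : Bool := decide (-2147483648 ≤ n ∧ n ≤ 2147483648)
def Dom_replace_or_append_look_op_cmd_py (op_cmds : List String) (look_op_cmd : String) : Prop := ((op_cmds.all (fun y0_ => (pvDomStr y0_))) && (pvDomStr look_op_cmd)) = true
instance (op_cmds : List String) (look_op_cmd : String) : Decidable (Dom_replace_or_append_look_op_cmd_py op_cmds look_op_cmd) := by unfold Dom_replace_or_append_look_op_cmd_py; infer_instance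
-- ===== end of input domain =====

-- B locates the first "look:" command's index and assembles head-slice ++ [look_op_cmd] ++ filtered tail, instead of A's flag-carrying single pass; objective: alternative decomposition (same cost).


-- ===== PORT A =====
-- the body of A's for-loop (state = (updated_commands, replaced))
def pvStepA (look_op_cmd : String) (st : List String × Bool) (command : String) : List String × Bool :=
  if PySem.Str.startswith command "look:" && !st.2 then (st.1 ++ [look_op_cmd], true)
  else if !(PySem.Str.startswith command "look:") then (st.1 ++ [command], st.2)
  else st

-- literal port of A: one pass with accumulator (updated_commands, replaced), final append if not replaced
def replace_or_append_look_op_cmd_py (op_cmds : List String) (look_op_cmd : String) : List String :=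
  let st := op_cmds.foldl (pvStepA look_op_cmd) ([], false)
  if !st.2 then st.1 ++ [look_op_cmd] else st.1

-- ===== PORT B =====
-- literal port of B: find the index of the first "look:" command, then slice / filter
def replace_or_append_look_op_cmd_py_alt (op_cmds : List String) (look_op_cmd : String) : List String :=
  match op_cmds.findIdx? (fun c => PySem.Str.startswith c "look:") with
  | none => op_cmds ++ [look_op_cmd]
  | some i => op_cmds.take i ++ [look_op_cmd]
      ++ (op_cmds.drop (i + 1)).filter (fun c => !PySem.Str.startswith c "look:")

-- ===== PRECONDITION & SPEC =====
def Spec_replace_or_append_look_op_cmd_py (op_cmds : List String) (look_op_cmd : String) (out : List String) : Prop := out = replace_or_append_look_op_cmd_py_alt op_cmds look_op_cmd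
instance (op_cmds : List String) (look_op_cmd : String) (out : List String) : Decidable (Spec_replace_or_append_look_op_cmd_py op_cmds look_op_cmd out) := by unfold Spec_replace_or_append_look_op_cmd_py; infer_instance

-- ===== CLAIM (what is proved, stated in full; the proofs are below) =====
def Claim_equal_replace_or_append_look_op_cmd_py : Prop := ∀ (op_cmds : List String) (look_op_cmd : String), Dom_replace_or_append_look_op_cmd_py op_cmds look_op_cmd → Spec_replace_or_append_look_op_cmd_py op_cmds look_op_cmd (replace_or_append_look_op_cmd_py op_cmds look_op_cmd)

-- ===== LEMMAS AND PROOFS =====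

theorem pvStepA_pos_false (look_op_cmd c : String) (u : List String)
    (hs : PySem.Str.startswith c "look:" = true) :
    pvStepA look_op_cmd (u, false) c = (u ++ [look_op_cmd], true) := by
  simp only [pvStepA, hs]; simp

theorem pvStepA_pos_true (look_op_cmd c : String) (u : List String)
    (hs : PySem.Str.startswith c "look:" = true) :
    pvStepA look_op_cmd (u, true) c = (u, true) := by
  simp only [pvStepA, hs]; simp

theorem pvStepA_neg (look_op_cmd c : String) (u : List String) (r : Bool)
    (hs : PySem.Str.startswith c "look:" = false) :
    pvStepA look_op_cmd (u, r) c = (u ++ [c], r) := by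
  simp only [pvStepA, hs]; simp

-- after the flag is set, A's loop just filters the remaining commands
theorem pvFoldTrue (look_op_cmd : String) (l : List String) (u : List String) :
    l.foldl (pvStepA look_op_cmd) (u, true)
      = (u ++ l.filter (fun c => !PySem.Str.startswith c "look:"), true) := by
  induction l generalizing u with
  | nil => simp
  | cons h t ih =>
    rw [List.foldl_cons]
    cases hs : PySem.Str.startswith h "look:" with
    | true =>
      rw [pvStepA_pos_true _ _ _ hs, ih]
      simp only [List.filter_cons, hs]; simp
    | false =>
      rw [pvStepA_neg _ _ _ _ hs, ih]
      simp only [List.filter_cons, hs]; simp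

-- before the flag is set, A's loop is characterised by the first "look:" index
theorem pvFoldFalse (look_op_cmd : String) (l : List String) (u : List String) :
    l.foldl (pvStepA look_op_cmd) (u, false)
    = match l.findIdx? (fun c => PySem.Str.startswith c "look:") with
      | none => (u ++ l, false)
      | some i => (u ++ l.take i ++ [look_op_cmd]
          ++ (l.drop (i + 1)).filter (fun c => !PySem.Str.startswith c "look:"), true) := by
  induction l generalizing u with
  | nil => simp
  | cons h t ih =>
    rw [List.foldl_cons]
    cases hs : PySem.Str.startswith h "look:" with
    | true =>
      rw [pvStepA_pos_false _ _ _ hs, pvFoldTrue]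
      simp only [List.findIdx?_cons, hs]; simp
    | false =>
      rw [pvStepA_neg _ _ _ _ hs, ih]
      simp only [List.findIdx?_cons, hs, Bool.false_eq_true, if_false]
      cases hfi : t.findIdx? (fun c => PySem.Str.startswith c "look:") with
      | none => simp only [Option.map_none]; simp
      | some i =>
        simp only [Option.map_some, List.take_succ_cons, List.drop_succ_cons]; simp

-- ===== VERDICT (by name: the statement is the Claim_ definition above) =====
theorem replace_or_append_look_op_cmd_py_spec : Claim_equal_replace_or_append_look_op_cmd_py := by
  intro op_cmds look_op_cmd _
  unfold Spec_replace_or_append_look_op_cmd_py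
  unfold replace_or_append_look_op_cmd_py replace_or_append_look_op_cmd_py_alt
  rw [pvFoldFalse]
  cases hfi : op_cmds.findIdx? (fun c => PySem.Str.startswith c "look:") <;>
    simp
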